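-- pv_equiv track=rewrite | github.com/charansai1432/Python-DSA | sliding window/kadane algo/maximum_value_subarray_sum_modulo_k.py | maximum_value_subarray_sum_modulo_k
-- ===== SOURCE A (Python) =====
-- import bisect
--
-- def maximum_value_subarray_sum_modulo_k(arr,k):
--     prefix = 0
--     n = len(arr)
--     sorted_prefix = [0]
--     max_val = 0                                 # we can also assume here prefix = cur_prefix
--                                                 # previous prefix are stored in the sorted_prefix
--     for i in range(n):
--
--         prefix = (prefix+arr[i])%k
--
--         idx = bisect.bisect_right(sorted_prefix,prefix)
--
--         if idx < len(sorted_prefix):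
--             max_val = max(max_val,prefix-sorted_prefix[idx]+k)
--
--         else:
--             max_val =  max(max_val,prefix)                  # There is NO previous prefix that is strictly greater than current prefix
--
--         bisect.insort(sorted_prefix,prefix)
--
--     return max_val
-- ===== SOURCE B (Python) =====
-- def maximum_value_subarray_sum_modulo_k(arr, k):
--     best = 0
--     suffix = list(arr)
--     while suffix:
--         s = 0
--         for a in suffix:
--             s = (s + a) % k
--             if s > best:
--                 best = s
--         suffix = suffix[1:]
--     return best
-- ===== Notes on version B (the rewrite author's own statement) =====
-- stated objective: simpler
-- what changed: Replaces the prefix-residue machinery (running prefix mod k, sorted list of previous prefixes, bisect_right successor lookup and insort) with a direct brute-force scan: for every suffix, accumulate the running sum mod k and track the maximum; no prefix store exists at all; B is shorter and plainer, not faster (plain quadratic brute force).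
import Mathlib
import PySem

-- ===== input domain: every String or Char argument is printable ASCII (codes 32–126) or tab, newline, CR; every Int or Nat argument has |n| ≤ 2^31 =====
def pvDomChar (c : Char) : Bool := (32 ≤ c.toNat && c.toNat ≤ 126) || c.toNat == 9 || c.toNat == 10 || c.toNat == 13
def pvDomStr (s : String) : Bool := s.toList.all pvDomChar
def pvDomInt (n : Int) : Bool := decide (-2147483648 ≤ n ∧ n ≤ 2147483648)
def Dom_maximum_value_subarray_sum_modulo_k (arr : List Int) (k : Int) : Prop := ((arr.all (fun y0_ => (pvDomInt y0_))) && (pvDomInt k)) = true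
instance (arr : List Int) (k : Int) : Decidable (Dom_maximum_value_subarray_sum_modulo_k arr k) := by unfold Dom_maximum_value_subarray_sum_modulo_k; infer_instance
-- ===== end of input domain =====

-- B drops A's prefix-residue machinery (running prefix mod k, sorted prefix list,
-- bisect_right successor lookup, insort) entirely and instead scans every suffix,
-- accumulating the running sum mod k and tracking the maximum: simpler and shorter
-- (objective: simpler); not faster — it is a plain O(n^2) brute force.

-- ===== PORT A =====
-- bisect.bisect_right on a sorted list = number of elements ≤ x; exact here
-- because sorted_prefix is always kept sorted by insort.
def pvBisectRight (l : List Int) (x : Int) : Nat := l.countP (fun y => decide (y ≤ x))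

-- bisect.insort (insort_right): insert after equal elements, keeping order.
def pvInsort (l : List Int) (x : Int) : List Int :=
  match l with
  | [] => [x]
  | h :: t => if h ≤ x then h :: pvInsort t x else x :: h :: t

-- the loop body of A (state: prefix, sorted_prefix, max_val)
def pvStepA (k : Int) (st : Int × List Int × Int) (a : Int) : Int × List Int × Int :=
  let pfx := PySem.Int.mod (st.1 + a) k
  let sp := st.2.1
  let idx := pvBisectRight sp pfx
  let mv := if idx < sp.length
    then max st.2.2 (pfx - sp.getD idx 0 + k)
    else max st.2.2 pfx
  (pfx, pvInsort sp pfx, mv)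

def maximum_value_subarray_sum_modulo_k (arr : List Int) (k : Int) : Int :=
  (arr.foldl (pvStepA k) ((0 : Int), ([0] : List Int), (0 : Int))).2.2

-- ===== PORT B =====
-- inner loop body of B (state: s, best)
def pvStepB (k : Int) (st : Int × Int) (a : Int) : Int × Int :=
  let s := PySem.Int.mod (st.1 + a) k
  (s, if st.2 < s then s else st.2)

-- the while loop of B: scan the current suffix, then drop its head
def pvOuterB (k : Int) : List Int → Int → Int
  | [], best => best
  | a :: t, best => pvOuterB k t (((a :: t).foldl (pvStepB k) (0, best)).2)

def maximum_value_subarray_sum_modulo_k_alt (arr : List Int) (k : Int) : Int :=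
  pvOuterB k arr 0

-- ===== PRECONDITION & SPEC =====
-- Pre_ excludes only k = 0, where Python A raises ZeroDivisionError (B raises too).
def Pre_maximum_value_subarray_sum_modulo_k (arr : List Int) (k : Int) : Prop := k ≠ 0
instance (arr : List Int) (k : Int) : Decidable (Pre_maximum_value_subarray_sum_modulo_k arr k) := by unfold Pre_maximum_value_subarray_sum_modulo_k; infer_instance
def pvWitness_maximum_value_subarray_sum_modulo_k : List Int × Int := ([3, -1, 4], 5)

def Spec_maximum_value_subarray_sum_modulo_k (arr : List Int) (k : Int) (out : Int) : Prop := out = maximum_value_subarray_sum_modulo_k_alt arr k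
instance (arr : List Int) (k : Int) (out : Int) : Decidable (Spec_maximum_value_subarray_sum_modulo_k arr k out) := by unfold Spec_maximum_value_subarray_sum_modulo_k; infer_instance

-- ===== CLAIM (what is proved, stated in full; the proofs are below) =====
def Claim_equal_maximum_value_subarray_sum_modulo_k : Prop := ∀ (arr : List Int) (k : Int), Dom_maximum_value_subarray_sum_modulo_k arr k → Pre_maximum_value_subarray_sum_modulo_k arr k → Spec_maximum_value_subarray_sum_modulo_k arr k (maximum_value_subarray_sum_modulo_k arr k)

-- ===== LEMMAS AND PROOFS =====

-- the running prefix residue of a list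
def pvPref (k : Int) (l : List Int) : Int :=
  l.foldl (fun p a => PySem.Int.mod (p + a) k) 0

-- c is the value (mod k) of some nonempty contiguous sublist of l
def pvIsCand (k : Int) (l : List Int) (c : Int) : Prop :=
  ∃ u v w : List Int, l = u ++ v ++ w ∧ v ≠ [] ∧ c = v.sum % k

-- r is the maximum of 0 and all candidates of l
def pvIsMax (k : Int) (l : List Int) (r : Int) : Prop :=
  0 ≤ r ∧ (r = 0 ∨ pvIsCand k l r) ∧ ∀ c, pvIsCand k l c → c ≤ r

theorem pvIsMax_unique {k : Int} {l : List Int} {r r' : Int}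
    (h : pvIsMax k l r) (h' : pvIsMax k l r') : r = r' := by
  obtain ⟨h0, h1, h2⟩ := h
  obtain ⟨h0', h1', h2'⟩ := h'
  apply le_antisymm
  · rcases h1 with rfl | hc
    · exact h0'
    · exact h2' _ hc
  · rcases h1' with rfl | hc
    · exact h0
    · exact h2 _ hc

theorem pv_mem_insort (l : List Int) (x y : Int) : y ∈ pvInsort l x ↔ y = x ∨ y ∈ l := by
  induction l with
  | nil => simp [pvInsort]
  | cons h t ih =>
    by_cases hx : h ≤ x <;> simp [pvInsort, hx, ih] <;> tauto

theorem pv_insort_sorted (l : List Int) (x : Int) (hs : l.Sorted (· ≤ ·)) :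
    (pvInsort l x).Sorted (· ≤ ·) := by
  induction l with
  | nil => simp [pvInsort, List.sorted_singleton]
  | cons h t ih =>
    rw [List.sorted_cons] at hs
    by_cases hx : h ≤ x
    · simp only [pvInsort, if_pos hx]
      rw [List.sorted_cons]
      refine ⟨?_, ih hs.2⟩
      intro b hb
      rcases (pv_mem_insort t x b).1 hb with rfl | hb
      · exact hx
      · exact hs.1 b hb
    · simp only [pvInsort, if_neg hx]
      rw [List.sorted_cons]
      refine ⟨?_, List.sorted_cons.2 hs⟩
      intro b hb
      rcases List.mem_cons.1 hb with rfl | hb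
      · omega
      · exact le_trans (by omega) (hs.1 b hb)

-- characterization of bisect_right on a sorted list
theorem pv_bisect_char (l : List Int) (x : Int) (hs : l.Sorted (· ≤ ·)) :
    (pvBisectRight l x < l.length →
      x < l.getD (pvBisectRight l x) 0 ∧ l.getD (pvBisectRight l x) 0 ∈ l ∧
      ∀ y ∈ l, x < y → l.getD (pvBisectRight l x) 0 ≤ y) ∧
    (¬ pvBisectRight l x < l.length → ∀ y ∈ l, y ≤ x) := by
  induction l with
  | nil => simp [pvBisectRight]
  | cons h t ih =>
    rw [List.sorted_cons] at hs
    obtain ⟨hht, hts⟩ := hs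
    by_cases hx : h ≤ x
    · have hidx : pvBisectRight (h :: t) x = pvBisectRight t x + 1 := by
        simp [pvBisectRight, List.countP_cons, hx]
      have ih' := ih hts
      constructor
      · intro hlt
        rw [hidx] at hlt ⊢
        simp only [List.length_cons] at hlt
        have hlt' : pvBisectRight t x < t.length := by omega
        have := ih'.1 hlt'
        have hg : (h :: t).getD (pvBisectRight t x + 1) 0 = t.getD (pvBisectRight t x) 0 := by
          simp [List.getD_cons_succ]
        rw [hg]
        refine ⟨this.1, List.mem_cons_of_mem _ this.2.1, ?_⟩
        intro y hy hxy
        rcases List.mem_cons.1 hy with rfl | hy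
        · omega
        · exact this.2.2 y hy hxy
      · intro hge
        rw [hidx] at hge
        simp only [List.length_cons] at hge
        have hge' : ¬ pvBisectRight t x < t.length := by omega
        intro y hy
        rcases List.mem_cons.1 hy with rfl | hy
        · exact hx
        · exact ih'.2 hge' y hy
    · have hcz : pvBisectRight (h :: t) x = 0 := by
        simp only [pvBisectRight, List.countP_cons]
        have : ∀ y ∈ t, ¬ y ≤ x := fun y hy hle => hx (le_trans (hht y hy) hle)
        have h0 : t.countP (fun y => decide (y ≤ x)) = 0 := by
          rw [List.countP_eq_zero]
          intro y hy
          simpa using this y hy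
        simp [h0, hx]
      constructor
      · intro _
        rw [hcz]
        simp only [List.getD_cons_zero]
        refine ⟨by omega, List.mem_cons_self, ?_⟩
        intro y hy _
        rcases List.mem_cons.1 hy with rfl | hy
        · exact le_refl _
        · exact hht y hy
      · intro hge
        rw [hcz] at hge
        simp at hge

-- ---- generic facts about pvPref (k > 0) ----

theorem pv_fold_mod_eq_sum (k : Int) (hk : 0 < k) :
    ∀ (l : List Int) (s : Int), l ≠ [] →
      l.foldl (fun p a => PySem.Int.mod (p + a) k) s = (s + l.sum) % k := by
  intro l
  induction l with
  | nil => intro s h; exact absurd rfl h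
  | cons a t ih =>
    intro s _
    rcases eq_or_ne t ([] : List Int) with rfl | ht
    · simp [PySem.Int.mod_eq_emod_of_pos hk]
    · simp only [List.foldl_cons, List.sum_cons]
      rw [ih _ ht, PySem.Int.mod_eq_emod_of_pos hk, Int.emod_add_emod, Int.add_assoc]

theorem pv_pref_eq (k : Int) (hk : 0 < k) (l : List Int) (h : l ≠ []) :
    pvPref k l = l.sum % k := by
  have := pv_fold_mod_eq_sum k hk l 0 h
  simpa [pvPref] using this

theorem pv_pref_bounds (k : Int) (hk : 0 < k) (l : List Int) :
    0 ≤ pvPref k l ∧ pvPref k l < k := by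
  rcases eq_or_ne l ([] : List Int) with rfl | h
  · simp [pvPref]; omega
  · rw [pv_pref_eq k hk l h]
    exact ⟨Int.emod_nonneg _ (by omega), Int.emod_lt_of_pos _ hk⟩

-- the value of the sublist v (with left part u, next element a) as a prefix difference
theorem pv_cand_shift (k : Int) (hk : 0 < k) (u v : List Int) (a : Int) :
    (v.sum + a) % k = (pvPref k ((u ++ v) ++ [a]) - pvPref k u) % k := by
  have hne : (u ++ v) ++ [a] ≠ ([] : List Int) := by simp
  rw [pv_pref_eq k hk _ hne]
  have hu : pvPref k u % k = u.sum % k := by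
    rcases eq_or_ne u ([] : List Int) with rfl | h
    · simp [pvPref]
    · rw [pv_pref_eq k hk u h, Int.emod_emod_of_dvd _ dvd_rfl]
  rw [Int.sub_emod, Int.emod_emod_of_dvd _ dvd_rfl, hu, ← Int.sub_emod]
  congr 1
  simp [List.sum_append]

-- splitting candidates of l ++ [a]
theorem pv_cand_snoc (k : Int) (l : List Int) (a c : Int) :
    pvIsCand k (l ++ [a]) c ↔ pvIsCand k l c ∨ ∃ u v, l = u ++ v ∧ c = (v.sum + a) % k := by
  constructor
  · rintro ⟨u, v, w, heq, hv, rfl⟩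
    rcases List.eq_nil_or_concat w with rfl | ⟨w', x, rfl⟩
    · rcases List.eq_nil_or_concat v with rfl | ⟨v', y, rfl⟩
      · exact absurd rfl hv
      · right
        have h2 : u ++ v' ++ [y] = l ++ [a] := by simpa using heq.symm
        have h3 : u ++ v' = l ∧ y = a := by
          have := List.append_inj' h2 rfl
          simpa using this
        exact ⟨u, v', h3.1.symm, by simp [h3.2, List.sum_append]⟩
    · left
      have h2 : (u ++ v ++ w') ++ [x] = l ++ [a] := by simpa using heq.symm
      have h3 : u ++ v ++ w' = l := (List.append_inj' h2 rfl).1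
      exact ⟨u, v, w', h3.symm, hv, rfl⟩
  · rintro (⟨u, v, w, rfl, hv, rfl⟩ | ⟨u, v, rfl, rfl⟩)
    · exact ⟨u, v, w ++ [a], by simp, hv, rfl⟩
    · exact ⟨u, v ++ [a], [], by simp, by simp, by simp [List.sum_append]⟩

-- splitting candidates of a :: t  (for B's outer loop)
theorem pv_cand_cons (k : Int) (a : Int) (t : List Int) (c : Int) :
    pvIsCand k (a :: t) c ↔ (∃ p q, a :: t = p ++ q ∧ p ≠ [] ∧ c = p.sum % k) ∨ pvIsCand k t c := by
  constructor
  · rintro ⟨u, v, w, heq, hv, rfl⟩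
    rcases u with _ | ⟨x, u'⟩
    · left
      exact ⟨v, w, by simpa using heq, hv, rfl⟩
    · right
      have h2 : a = x ∧ t = u' ++ (v ++ w) := by simpa using heq
      exact ⟨u', v, w, by simp [h2.2], hv, rfl⟩
  · rintro (⟨p, q, heq, hp, rfl⟩ | ⟨u, v, w, rfl, hv, rfl⟩)
    · exact ⟨[], p, q, by simpa using heq, hp, rfl⟩
    · exact ⟨a :: u, v, w, by simp, hv, rfl⟩

-- ---- B's inner loop (k > 0): max of b and all (shifted) nonempty-prefix values ----
theorem pv_innerB (k : Int) (hk : 0 < k) (v : List Int) :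
    ∀ s b : Int,
      b ≤ (v.foldl (pvStepB k) (s, b)).2 ∧
      (∀ p q, v = p ++ q → p ≠ [] → ((s + p.sum) % k) ≤ (v.foldl (pvStepB k) (s, b)).2) ∧
      ((v.foldl (pvStepB k) (s, b)).2 = b ∨
        ∃ p q, v = p ++ q ∧ p ≠ [] ∧ (v.foldl (pvStepB k) (s, b)).2 = (s + p.sum) % k) := by
  induction v with
  | nil =>
    intro s b
    refine ⟨le_refl _, ?_, Or.inl rfl⟩
    intro p q h hp
    exact absurd (List.append_eq_nil_iff.1 h.symm).1 hp
  | cons a t ih =>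
    intro s b
    have hmod : PySem.Int.mod (s + a) k = (s + a) % k := PySem.Int.mod_eq_emod_of_pos hk
    set s1 := (s + a) % k with hs1
    set b1 := if b < s1 then s1 else b with hb1
    have hstep : pvStepB k (s, b) a = (s1, b1) := by
      simp [pvStepB, hmod, hs1, hb1]
    have hfold : (a :: t).foldl (pvStepB k) (s, b) = t.foldl (pvStepB k) (s1, b1) := by
      simp [List.foldl_cons, hstep]
    obtain ⟨ih1, ih2, ih3⟩ := ih s1 b1
    have hb1b : b ≤ b1 := by rw [hb1]; split <;> omega
    have hs1b : s1 ≤ b1 := by rw [hb1]; split <;> omega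
    -- the key shift: (s1 + x) % k = (s + a + x) % k
    have hshift : ∀ x : Int, (s1 + x) % k = (s + a + x) % k := by
      intro x; rw [hs1, Int.emod_add_emod]
    refine ⟨?_, ?_, ?_⟩
    · rw [hfold]; exact le_trans hb1b ih1
    · intro p q heq hp
      rcases p with _ | ⟨x, p'⟩
      · exact absurd rfl hp
      · have hx : a = x ∧ t = p' ++ q := by simpa using heq
        obtain ⟨h2a, ht⟩ := hx
        subst h2a
        rcases eq_or_ne p' ([] : List Int) with rfl | hp'
        · -- value is s1 itself
          rw [hfold]
          have : (s + (a :: ([] : List Int)).sum) % k = s1 := by simp [hs1]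
          rw [this]
          exact le_trans hs1b ih1
        · rw [hfold]
          have := ih2 p' q ht hp'
          have hv : (s1 + p'.sum) % k = (s + (a :: p').sum) % k := by
            rw [hshift]; congr 1; simp; ring
          rw [← hv]
          exact this
    · rw [hfold]
      rcases ih3 with h | ⟨p, q, ht, hp, hval⟩
      · rw [h, hb1]
        split
        · right
          exact ⟨[a], t, rfl, by simp, by simp [hs1]⟩
        · left; rfl
      · right
        refine ⟨a :: p, q, by simp [ht], by simp, ?_⟩
        rw [hval, hshift]
        congr 1; simp; ring

-- ---- B's outer loop (k > 0) ----
theorem pv_outerB (k : Int) (hk : 0 < k) (v : List Int) :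
    ∀ b : Int,
      b ≤ pvOuterB k v b ∧
      (∀ c, pvIsCand k v c → c ≤ pvOuterB k v b) ∧
      (pvOuterB k v b = b ∨ pvIsCand k v (pvOuterB k v b)) := by
  induction v with
  | nil =>
    intro b
    refine ⟨le_refl _, ?_, Or.inl rfl⟩
    rintro c ⟨u, v, w, heq, hv, rfl⟩
    have := (List.append_eq_nil_iff.1 ((List.append_eq_nil_iff.1 heq.symm).1)).2
    exact absurd this hv
  | cons a t ih =>
    intro b
    obtain ⟨hi1, hi2, hi3⟩ := pv_innerB k hk (a :: t) 0 b
    set b1 := ((a :: t).foldl (pvStepB k) (0, b)).2 with hb1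
    have hout : pvOuterB k (a :: t) b = pvOuterB k t b1 := rfl
    obtain ⟨ho1, ho2, ho3⟩ := ih b1
    refine ⟨?_, ?_, ?_⟩
    · rw [hout]; exact le_trans hi1 ho1
    · intro c hc
      rw [hout]
      rcases (pv_cand_cons k a t c).1 hc with ⟨p, q, heq, hp, rfl⟩ | hc
      · have := hi2 p q heq hp
        simpa using le_trans this ho1
      · exact ho2 c hc
    · rw [hout]
      rcases ho3 with h | hc
      · rw [h]
        rcases hi3 with h' | ⟨p, q, heq, hp, hval⟩
        · left; exact h'
        · right
          rw [pv_cand_cons]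
          left
          exact ⟨p, q, heq, hp, by simpa using hval⟩
      · right
        rw [pv_cand_cons]
        right; exact hc
    
theorem pv_B_isMax (k : Int) (hk : 0 < k) (arr : List Int) :
    pvIsMax k arr (maximum_value_subarray_sum_modulo_k_alt arr k) := by
  obtain ⟨h1, h2, h3⟩ := pv_outerB k hk arr 0
  exact ⟨h1, h3, h2⟩

-- ---- A's loop invariant (k > 0) ----
def pvInvA (k : Int) (done : List Int) (st : Int × List Int × Int) : Prop :=
  st.1 = pvPref k done ∧
  st.2.1.Sorted (· ≤ ·) ∧
  (∀ x, x ∈ st.2.1 ↔ ∃ i, i ≤ done.length ∧ x = pvPref k (done.take i)) ∧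
  pvIsMax k done st.2.2

theorem pv_stepA_inv (k : Int) (hk : 0 < k) (done : List Int) (a : Int)
    (st : Int × List Int × Int) (h : pvInvA k done st) :
    pvInvA k (done ++ [a]) (pvStepA k st a) := by
  obtain ⟨hp, hsorted, hmem, hmax0, hmaxdisj, hmaxle⟩ := h
  -- element bounds of the stored list
  have hbounds : ∀ x ∈ st.2.1, 0 ≤ x ∧ x < k := by
    intro x hx
    obtain ⟨i, _, rfl⟩ := (hmem x).1 hx
    exact pv_pref_bounds k hk _
  have hmod : PySem.Int.mod (st.1 + a) k = (st.1 + a) % k := PySem.Int.mod_eq_emod_of_pos hk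
  have hp' : PySem.Int.mod (st.1 + a) k = pvPref k (done ++ [a]) := by
    rw [hmod, hp]
    simp [pvPref, List.foldl_append, PySem.Int.mod_eq_emod_of_pos hk]
  set p' := pvPref k (done ++ [a]) with hp'def
  have hp'bounds : 0 ≤ p' ∧ p' < k := pv_pref_bounds k hk _
  -- every "new" candidate equals (p' - x) % k for a stored x, and vice versa
  have hcand_val : ∀ u v : List Int, done = u ++ v →
      (v.sum + a) % k = (p' - pvPref k u) % k := by
    intro u v huv
    rw [hp'def, huv]
    exact pv_cand_shift k hk u v a
  have hzero_mem : (0 : Int) ∈ st.2.1 := by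
    rw [hmem]
    exact ⟨0, by simp, by simp [pvPref]⟩
  -- the candidate value (p' - x) % k computed explicitly
  have hval_le : ∀ x, 0 ≤ x → x < k → (p' - x) % k = if x ≤ p' then p' - x else p' - x + k := by
    intro x hx0 hxk
    split
    · exact Int.emod_eq_of_lt (by omega) (by omega)
    · calc (p' - x) % k = (p' - x + k) % k := (Int.add_emod_right _ _).symm
        _ = p' - x + k := Int.emod_eq_of_lt (by omega) (by omega)
  constructor
  · exact (by simpa [pvStepA] using hp')
  constructor
  · simp only [pvStepA]
    exact pv_insort_sorted _ _ hsorted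
  constructor
  · intro x
    simp only [pvStepA]
    rw [pv_mem_insort, hmem x]
    constructor
    · rintro (rfl | ⟨i, hi, rfl⟩)
      · refine ⟨done.length + 1, by simp, ?_⟩
        have htake : List.take (done.length + 1) (done ++ [a]) = done ++ [a] :=
          List.take_of_length_le (by simp)
        rw [htake, ← hp'def]
        exact hp'
      · exact ⟨i, by simp; omega, by rw [List.take_append_of_le_length hi]⟩
    · rintro ⟨i, hi, rfl⟩
      simp only [List.length_append, List.length_cons, List.length_nil] at hi
      rcases Nat.lt_or_ge i (done.length + 1) with hlt | hge
      · right
        refine ⟨i, by omega, ?_⟩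
        rw [List.take_append_of_le_length (by omega)]
      · left
        have : i = done.length + 1 := by omega
        subst this
        have htake : List.take (done.length + 1) (done ++ [a]) = done ++ [a] :=
          List.take_of_length_le (by simp)
        rw [htake, ← hp'def]
        exact hp'.symm
  · -- the max_val component
    simp only [pvStepA]
    rw [hp'] at *
    have hb := pv_bisect_char st.2.1 p' hsorted
    by_cases hidx : pvBisectRight st.2.1 p' < st.2.1.length
    · obtain ⟨hgt, hmemm, hmin⟩ := hb.1 hidx
      set m := st.2.1.getD (pvBisectRight st.2.1 p') 0 with hm
      have hmb := hbounds m hmemm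
      rw [if_pos hidx]
      refine ⟨by have := le_max_left st.2.2 (p' - m + k); omega, ?_, ?_⟩
      · -- the result is 0 or a candidate
        rcases max_cases st.2.2 (p' - m + k) with ⟨he, _⟩ | ⟨he, _⟩
        · rw [he]
          rcases hmaxdisj with h | h
          · exact Or.inl h
          · right
            obtain ⟨u, v, w, hdone, hv, hc⟩ := h
            exact ⟨u, v, w ++ [a], by simp [hdone], hv, hc⟩
        · right
          rw [he]
          obtain ⟨i, hi, him⟩ := (hmem m).1 hmemm
          rw [pv_cand_snoc]
          right
          refine ⟨done.take i, done.drop i, (List.take_append_drop i done).symm, ?_⟩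
          rw [hcand_val (done.take i) (done.drop i) (List.take_append_drop i done).symm, ← him,
            hval_le m hmb.1 hmb.2, if_neg (by omega)]
      · -- every candidate of done ++ [a] is ≤ the result
        intro c hc
        rw [pv_cand_snoc] at hc
        rcases hc with hc | ⟨u, v, rfl, rfl⟩
        · exact le_trans (hmaxle c hc) (le_max_left _ _)
        · rw [hcand_val u v rfl]
          have humem : pvPref k u ∈ st.2.1 := by
            rw [hmem]
            exact ⟨u.length, by simp, by rw [List.take_left]⟩
          have hub := hbounds _ humem
          rw [hval_le _ hub.1 hub.2]
          split
          · -- non-wrap value ≤ p' < p' - m + k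
            have : m < k := hmb.2
            have := le_max_right st.2.2 (p' - m + k)
            omega
          · -- wrap value: m minimal among stored > p'
            have : m ≤ pvPref k u := hmin _ humem (by omega)
            have := le_max_right st.2.2 (p' - m + k)
            omega
    · have hall := hb.2 hidx
      rw [if_neg hidx]
      refine ⟨by have := le_max_left st.2.2 p'; omega, ?_, ?_⟩
      · rcases max_cases st.2.2 p' with ⟨he, _⟩ | ⟨he, _⟩
        · rw [he]
          rcases hmaxdisj with h | h
          · exact Or.inl h
          · right
            obtain ⟨u, v, w, hdone, hv, hc⟩ := h
            exact ⟨u, v, w ++ [a], by simp [hdone], hv, hc⟩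
        · right
          rw [he, pv_cand_snoc]
          right
          refine ⟨[], done, by simp, ?_⟩
          rw [hcand_val [] done (by simp)]
          have : pvPref k ([] : List Int) = 0 := by simp [pvPref]
          rw [this, hval_le 0 (by omega) hk, if_pos (by omega)]
          ring
      · intro c hc
        rw [pv_cand_snoc] at hc
        rcases hc with hc | ⟨u, v, rfl, rfl⟩
        · exact le_trans (hmaxle c hc) (le_max_left _ _)
        · rw [hcand_val u v rfl]
          have humem : pvPref k u ∈ st.2.1 := by
            rw [hmem]
            exact ⟨u.length, by simp, by rw [List.take_left]⟩
          have hub := hbounds _ humem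
          have hup : pvPref k u ≤ p' := hall _ humem
          rw [hval_le _ hub.1 hub.2, if_pos hup]
          have := le_max_right st.2.2 p'
          omega

theorem pv_foldA_inv (k : Int) (hk : 0 < k) :
    ∀ (l done : List Int) (st : Int × List Int × Int), pvInvA k done st →
      pvInvA k (done ++ l) (l.foldl (pvStepA k) st) := by
  intro l
  induction l with
  | nil => intro done st h; simpa using h
  | cons a t ih =>
    intro done st h
    have := ih (done ++ [a]) (pvStepA k st a) (pv_stepA_inv k hk done a st h)
    simpa using this

theorem pv_A_isMax (k : Int) (hk : 0 < k) (arr : List Int) :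
    pvIsMax k arr (maximum_value_subarray_sum_modulo_k arr k) := by
  have hbase : pvInvA k [] ((0 : Int), ([0] : List Int), (0 : Int)) := by
    refine ⟨by simp [pvPref], by simp [List.sorted_singleton], ?_, ?_⟩
    · intro x
      simp only [List.mem_singleton]
      constructor
      · rintro rfl; exact ⟨0, by simp, by simp [pvPref]⟩
      · rintro ⟨i, hi, rfl⟩; simp [pvPref]
    · refine ⟨le_refl _, Or.inl rfl, ?_⟩
      rintro c ⟨u, v, w, heq, hv, rfl⟩
      have := (List.append_eq_nil_iff.1 ((List.append_eq_nil_iff.1 heq.symm).1)).2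
      exact absurd this hv
  have := pv_foldA_inv k hk arr [] _ hbase
  simpa [maximum_value_subarray_sum_modulo_k] using this.2.2.2

-- ---- the k < 0 case: both sides return 0 ----
theorem pv_A_neg (k : Int) (hk : k < 0) :
    ∀ (l : List Int) (st : Int × List Int × Int),
      st.2.2 = 0 → k < st.1 → st.1 ≤ 0 → (∀ x ∈ st.2.1, k < x ∧ x ≤ 0) →
      (l.foldl (pvStepA k) st).2.2 = 0 := by
  intro l
  induction l with
  | nil => intro st h _ _ _; exact h
  | cons a t ih =>
    intro st hmv hp1 hp2 hsp
    have hb := PySem.Int.mod_neg_bounds (a := st.1 + a) hk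
    set p' := PySem.Int.mod (st.1 + a) k with hp'
    apply ih
    · -- new max_val is still 0
      simp only [pvStepA, hmv, ← hp']
      split
      · rename_i hidx
        have hmem : st.2.1.getD (pvBisectRight st.2.1 p') 0 ∈ st.2.1 := by
          rw [List.getD_eq_getElem _ _ hidx]
          exact List.getElem_mem _
        have := hsp _ hmem
        have : p' - st.2.1.getD (pvBisectRight st.2.1 p') 0 + k ≤ 0 := by omega
        omega
      · omega
    · simpa [pvStepA, ← hp'] using hb.1
    · simpa [pvStepA, ← hp'] using hb.2
    · intro x hx
      simp only [pvStepA, ← hp'] at hx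
      rcases (pv_mem_insort _ _ _).1 hx with rfl | hx
      · exact ⟨hb.1, hb.2⟩
      · exact hsp x hx

theorem pv_B_inner_neg (k : Int) (hk : k < 0) :
    ∀ (v : List Int) (s : Int), (v.foldl (pvStepB k) (s, 0)).2 = 0 := by
  intro v
  induction v with
  | nil => intro s; rfl
  | cons a t ih =>
    intro s
    have hb := PySem.Int.mod_neg_bounds (a := s + a) hk
    have : pvStepB k (s, 0) a = (PySem.Int.mod (s + a) k, 0) := by
      simp only [pvStepB]
      congr 1
      rw [if_neg (by omega)]
    rw [List.foldl_cons, this]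
    exact ih _

theorem pv_B_neg (k : Int) (hk : k < 0) : ∀ v : List Int, pvOuterB k v 0 = 0 := by
  intro v
  induction v with
  | nil => rfl
  | cons a t ih =>
    show pvOuterB k t ((a :: t).foldl (pvStepB k) (0, 0)).2 = 0
    rw [pv_B_inner_neg k hk]
    exact ih

-- ===== VERDICT (by name: the statement is the Claim_ definition above) =====
theorem maximum_value_subarray_sum_modulo_k_spec : Claim_equal_maximum_value_subarray_sum_modulo_k := by
  intro arr k _ hk
  unfold Spec_maximum_value_subarray_sum_modulo_k
  rcases lt_trichotomy k 0 with hneg | hzero | hpos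
  · rw [maximum_value_subarray_sum_modulo_k_alt, pv_B_neg k hneg]
    exact pv_A_neg k hneg arr _ rfl (by omega) (by omega) (by intro x hx; simp at hx; omega)
  · exact absurd hzero hk
  · exact pvIsMax_unique (pv_A_isMax k hpos arr) (pv_B_isMax k hpos arr)
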